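-- pv_equiv track=rewrite | github.com/shubham4734singh/DarkHook_Defense | Backend/modules/url_analysis/link.py | decode_leetspeak
-- ===== SOURCE A (Python) =====
-- def decode_leetspeak(text: str) -> str:
-- 	"""Convert leet-speak to normal text for pattern matching"""
-- 	leet_map = {
-- 		'0': 'o', '1': 'i', '3': 'e', '4': 'a', '5': 's',
-- 		'7': 't', '8': 'b', '9': 'g', '@': 'a', '$': 's',
-- 		'!': 'i', '|': 'l', '+': 't', '()': 'o', '[]': 'l'
-- 	}
-- 	decoded = text.lower()
-- 	for leet, normal in leet_map.items():
-- 		decoded = decoded.replace(leet, normal)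
-- 	return decoded
-- ===== SOURCE B (Python) =====
-- def decode_leetspeak(text: str) -> str:
--     """Convert leet-speak to normal text for pattern matching (single left-to-right scan)"""
--     leet = {
--         '0': 'o', '1': 'i', '3': 'e', '4': 'a', '5': 's',
--         '7': 't', '8': 'b', '9': 'g', '@': 'a', '$': 's',
--         '!': 'i', '|': 'l', '+': 't'
--     }
--     s = text.lower()
--     out = []
--     i = 0
--     n = len(s)
--     while i < n:
--         c = s[i]
--         if c == '(' and i + 1 < n and s[i + 1] == ')':
--             out.append('o')
--             i += 2
--         elif c == '[' and i + 1 < n and s[i + 1] == ']':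
--             out.append('l')
--             i += 2
--         else:
--             out.append(leet.get(c, c))
--             i += 1
--     return ''.join(out)
-- ===== Notes on version B (the rewrite author's own statement) =====
-- stated objective: alternative
-- what changed: Replaces the 15 sequential full-string replace passes with a single left-to-right character scan that handles the two-character bracket tokens by lookahead and maps single leet characters through a dict in the same pass.
import Mathlib
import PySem

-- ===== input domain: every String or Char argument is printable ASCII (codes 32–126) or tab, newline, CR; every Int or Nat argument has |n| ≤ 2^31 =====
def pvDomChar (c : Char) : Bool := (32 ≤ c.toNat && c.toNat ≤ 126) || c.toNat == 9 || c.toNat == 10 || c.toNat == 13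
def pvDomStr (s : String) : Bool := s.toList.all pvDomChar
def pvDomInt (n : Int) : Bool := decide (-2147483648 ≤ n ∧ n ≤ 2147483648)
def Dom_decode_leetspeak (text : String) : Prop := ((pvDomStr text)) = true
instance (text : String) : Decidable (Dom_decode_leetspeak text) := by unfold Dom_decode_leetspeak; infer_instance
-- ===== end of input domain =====

-- B replaces A's 15 sequential full-string replace passes by one left-to-right
-- character scan with lookahead for the two-character bracket tokens and a
-- single-character table lookup; objective: alternative (one pass instead of 15).


-- ===== PORT A =====
-- leet_map.items() in insertion order
def leetPairs : List (String × String) :=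
  [("0","o"),("1","i"),("3","e"),("4","a"),("5","s"),
   ("7","t"),("8","b"),("9","g"),("@","a"),("$","s"),
   ("!","i"),("|","l"),("+","t"),("()","o"),("[]","l")]

def decode_leetspeak (text : String) : String :=
  leetPairs.foldl (fun decoded ln => PySem.Str.replace decoded ln.1 ln.2) (PySem.Str.lower text)

-- ===== PORT B =====
-- B's single-char dict `leet`
def leetDict : PySem.Dict Char Char :=
  PySem.Dict.ofList [('0','o'),('1','i'),('3','e'),('4','a'),('5','s'),
                     ('7','t'),('8','b'),('9','g'),('@','a'),('$','s'),
                     ('!','i'),('|','l'),('+','t')]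

-- B's while loop over index i with lookahead s[i+1], as recursion on the remaining characters
def scanLeet : List Char → List Char
  | [] => []
  | [c] => [PySem.Dict.getD leetDict c c]
  | c1 :: c2 :: t =>
    if c1 = '(' ∧ c2 = ')' then 'o' :: scanLeet t
    else if c1 = '[' ∧ c2 = ']' then 'l' :: scanLeet t
    else PySem.Dict.getD leetDict c1 c1 :: scanLeet (c2 :: t)
termination_by l => l.length

def decode_leetspeak_alt (text : String) : String :=
  String.ofList (scanLeet (PySem.Str.lower text).toList)

-- ===== PRECONDITION & SPEC =====
def Spec_decode_leetspeak (text : String) (out : String) : Prop := out = decode_leetspeak_alt text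
instance (text : String) (out : String) : Decidable (Spec_decode_leetspeak text out) := by unfold Spec_decode_leetspeak; infer_instance

-- ===== CLAIM (what is proved, stated in full; the proofs are below) =====
def Claim_equal_decode_leetspeak : Prop := ∀ (text : String), Dom_decode_leetspeak text → Spec_decode_leetspeak text (decode_leetspeak text)

-- ===== LEMMAS AND PROOFS =====

-- single-character substitution as a function on characters
def mapc (a b c : Char) : Char := if c = a then b else c

-- non-overlapping left-to-right replacement of the two-character pattern [a, b] by [r]
def pairRep (a b r : Char) : List Char → List Char
  | [] => []
  | [c] => [c]
  | c1 :: c2 :: t =>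
    if c1 = a ∧ c2 = b then r :: pairRep a b r t else c1 :: pairRep a b r (c2 :: t)
termination_by l => l.length

lemma go_single (a b : Char) (fuel : Nat) : ∀ (l acc : List Char), l.length ≤ fuel →
    PySem.Chars.replace.go [a] [b] fuel l acc = acc.reverse ++ l.map (mapc a b) := by
  induction fuel with
  | zero =>
    intro l acc h
    cases l with
    | nil => simp [PySem.Chars.replace.go]
    | cons c t => simp at h
  | succ n ih =>
    intro l acc h
    cases l with
    | nil => simp [PySem.Chars.replace.go]
    | cons c t =>
      by_cases hac : a = c
      · subst hac
        have hpre : [a].isPrefixOf (a :: t) = true := by simp [List.isPrefixOf]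
        simp only [PySem.Chars.replace.go, hpre, if_true]
        rw [ih _ _ (by simpa using Nat.le_of_succ_le_succ h)]
        simp [mapc]
      · have hpre : [a].isPrefixOf (c :: t) = false := by simp [List.isPrefixOf, hac]
        simp only [PySem.Chars.replace.go, hpre, Bool.false_eq_true, if_false]
        rw [ih _ _ (by simp at h; omega)]
        simp only [mapc, List.reverse_cons, List.append_assoc, List.singleton_append,
          List.map_cons, if_neg (fun h : c = a => hac h.symm)]

lemma replace_single (a b : Char) (s : List Char) :
    PySem.Chars.replace s [a] [b] = s.map (mapc a b) := by
  simpa using go_single a b s.length s [] le_rfl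

lemma go_pair (a b r : Char) (fuel : Nat) : ∀ (l acc : List Char), l.length ≤ fuel →
    PySem.Chars.replace.go [a, b] [r] fuel l acc = acc.reverse ++ pairRep a b r l := by
  induction fuel with
  | zero =>
    intro l acc h
    cases l with
    | nil => simp [PySem.Chars.replace.go, pairRep]
    | cons c t => simp at h
  | succ n ih =>
    intro l acc h
    cases l with
    | nil => simp [PySem.Chars.replace.go, pairRep]
    | cons c t =>
      by_cases hpre : [a, b].isPrefixOf (c :: t) = true
      · obtain ⟨c', t', rfl, hac, hbc⟩ : ∃ c' t', t = c' :: t' ∧ a = c ∧ b = c' := by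
          cases t with
          | nil => simp [List.isPrefixOf] at hpre
          | cons c' t' =>
            refine ⟨c', t', rfl, ?_, ?_⟩ <;> simp [List.isPrefixOf] at hpre <;> tauto
        subst hac; subst hbc
        simp only [PySem.Chars.replace.go, hpre, if_true]
        rw [show ([a, b].length : Nat) = 2 from rfl]
        rw [show List.drop 2 (a :: b :: t') = t' from rfl]
        rw [ih _ _ (by simp at h; omega)]
        simp [pairRep]
      · have hpre' : [a, b].isPrefixOf (c :: t) = false := Bool.eq_false_iff.mpr hpre
        simp only [PySem.Chars.replace.go, hpre', Bool.false_eq_true, if_false]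
        rw [ih _ _ (by simp at h; omega)]
        have hnp : ¬ (c = a ∧ t.head? = some b) := by
          rintro ⟨h1, h2⟩
          cases t with
          | nil => simp at h2
          | cons c' t' =>
            simp at h2
            exact hpre (by simp [List.isPrefixOf, h1.symm, h2.symm])
        cases t with
        | nil => simp [pairRep]
        | cons c' t' =>
          have hne : ¬ (c = a ∧ c' = b) := by simpa using hnp
          simp [pairRep, hne]

lemma replace_pair (a b r : Char) (s : List Char) :
    PySem.Chars.replace s [a, b] [r] = pairRep a b r s := by
  simpa using go_pair a b r s.length s [] le_rfl

lemma leet_items :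
    leetDict.items = [('0','o'),('1','i'),('3','e'),('4','a'),('5','s'),
                      ('7','t'),('8','b'),('9','g'),('@','a'),('$','s'),
                      ('!','i'),('|','l'),('+','t')] := by decide

-- the composition of A's thirteen single-character passes is B's table lookup
set_option maxHeartbeats 1000000 in
lemma comp_eq_lookup (c : Char) :
    mapc '+' 't' (mapc '|' 'l' (mapc '!' 'i' (mapc '$' 's' (mapc '@' 'a' (mapc '9' 'g'
      (mapc '8' 'b' (mapc '7' 't' (mapc '5' 's' (mapc '4' 'a' (mapc '3' 'e' (mapc '1' 'i'
        (mapc '0' 'o' c)))))))))))) = PySem.Dict.getD leetDict c c := by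
  by_cases h0 : c = '0'; · subst h0; decide
  by_cases h1 : c = '1'; · subst h1; decide
  by_cases h3 : c = '3'; · subst h3; decide
  by_cases h4 : c = '4'; · subst h4; decide
  by_cases h5 : c = '5'; · subst h5; decide
  by_cases h7 : c = '7'; · subst h7; decide
  by_cases h8 : c = '8'; · subst h8; decide
  by_cases h9 : c = '9'; · subst h9; decide
  by_cases hA : c = '@'; · subst hA; decide
  by_cases hS : c = '$'; · subst hS; decide
  by_cases hE : c = '!'; · subst hE; decide
  by_cases hP : c = '|'; · subst hP; decide
  by_cases hT : c = '+'; · subst hT; decide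
  have hfind : List.find? (fun p => p.1 == c) leetDict.items = none := by
    rw [leet_items]
    rw [List.find?_cons_of_neg (by simpa using Ne.symm h0),
        List.find?_cons_of_neg (by simpa using Ne.symm h1),
        List.find?_cons_of_neg (by simpa using Ne.symm h3),
        List.find?_cons_of_neg (by simpa using Ne.symm h4),
        List.find?_cons_of_neg (by simpa using Ne.symm h5),
        List.find?_cons_of_neg (by simpa using Ne.symm h7),
        List.find?_cons_of_neg (by simpa using Ne.symm h8),
        List.find?_cons_of_neg (by simpa using Ne.symm h9),
        List.find?_cons_of_neg (by simpa using Ne.symm hA),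
        List.find?_cons_of_neg (by simpa using Ne.symm hS),
        List.find?_cons_of_neg (by simpa using Ne.symm hE),
        List.find?_cons_of_neg (by simpa using Ne.symm hP),
        List.find?_cons_of_neg (by simpa using Ne.symm hT),
        List.find?_nil]
  have hc : PySem.Dict.getD leetDict c c = c := by
    simp [PySem.Dict.getD, PySem.Dict.get?, hfind]
  rw [hc]
  simp only [mapc, if_neg h0, if_neg h1, if_neg h3, if_neg h4, if_neg h5, if_neg h7,
    if_neg h8, if_neg h9, if_neg hA, if_neg hS, if_neg hE, if_neg hP, if_neg hT]

-- A's thirteen single-character map passes collapse into one pass of B's table lookup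
lemma maps_collapse (L : List Char) :
    List.map (mapc '+' 't') (List.map (mapc '|' 'l') (List.map (mapc '!' 'i')
      (List.map (mapc '$' 's') (List.map (mapc '@' 'a') (List.map (mapc '9' 'g')
        (List.map (mapc '8' 'b') (List.map (mapc '7' 't') (List.map (mapc '5' 's')
          (List.map (mapc '4' 'a') (List.map (mapc '3' 'e') (List.map (mapc '1' 'i')
            (List.map (mapc '0' 'o') L)))))))))))) =
      List.map (fun c => PySem.Dict.getD leetDict c c) L := by
  induction L with
  | nil => simp
  | cons c t ih =>
    simp only [List.map_cons, ih, List.cons.injEq, and_true]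
    exact comp_eq_lookup c

-- the table lookup never produces a bracket, and fixes brackets
lemma lookup_bracket (c x : Char) (hx : x = '(' ∨ x = ')' ∨ x = '[' ∨ x = ']')
    (h : PySem.Dict.getD leetDict c c = x) : c = x := by
  unfold PySem.Dict.getD PySem.Dict.get? at h
  cases hf : List.find? (fun p => p.1 == c) leetDict.items with
  | none => rw [hf] at h; simpa using h
  | some p =>
    rw [hf] at h
    simp only [Option.map_some, Option.getD_some] at h
    have hmem := List.mem_of_find?_eq_some hf
    rw [leet_items] at hmem
    simp only [List.mem_cons, List.not_mem_nil, or_false] at hmem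
    rcases hx with rfl | rfl | rfl | rfl <;>
      rcases hmem with h'|h'|h'|h'|h'|h'|h'|h'|h'|h'|h'|h'|h' <;>
      (subst h'; exact absurd h (by decide))

lemma pr_ne_nil (a b r x : Char) (xs : List Char) : pairRep a b r (x :: xs) ≠ [] := by
  cases xs with
  | nil => simp [pairRep]
  | cons y t => by_cases h : x = a ∧ y = b <;> simp [pairRep, h]

lemma pr_head (a b r x : Char) (xs : List Char) :
    (pairRep a b r (x :: xs)).head? = some x ∨ (pairRep a b r (x :: xs)).head? = some r := by
  cases xs with
  | nil => simp [pairRep]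
  | cons y t => by_cases h : x = a ∧ y = b <;> simp [pairRep, h]

lemma pr_cons_ne (a b r x : Char) (h : x ≠ a) (xs : List Char) :
    pairRep a b r (x :: xs) = x :: pairRep a b r xs := by
  cases xs with
  | nil => simp [pairRep]
  | cons y t =>
    have hne : ¬ (x = a ∧ y = b) := fun hc => h hc.1
    simp [pairRep, hne]

lemma pr_cons_pair (a b r x y : Char) (t : List Char) (h : ¬ (x = a ∧ y = b)) :
    pairRep a b r (x :: y :: t) = x :: pairRep a b r (y :: t) := by
  simp [pairRep, h]

-- B's scan computes A's '()' pass followed by A's '[]' pass on the mapped string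
lemma scan_eq (cs : List Char) :
    scanLeet cs =
      pairRep '[' ']' 'l' (pairRep '(' ')' 'o'
        (cs.map (fun c => PySem.Dict.getD leetDict c c))) := by
  induction cs using scanLeet.induct with
  | case1 => simp [scanLeet, pairRep]
  | case2 c => simp [scanLeet, pairRep]
  | case3 c1 c2 t h ih =>
    obtain ⟨rfl, rfl⟩ := h
    have f1 : PySem.Dict.getD leetDict '(' '(' = '(' := by decide
    have f2 : PySem.Dict.getD leetDict ')' ')' = ')' := by decide
    rw [show scanLeet ('(' :: ')' :: t) = 'o' :: scanLeet t by simp [scanLeet]]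
    rw [ih]
    simp only [List.map_cons, f1, f2]
    rw [show pairRep '(' ')' 'o' ('(' :: ')' :: (t.map fun c => PySem.Dict.getD leetDict c c))
          = 'o' :: pairRep '(' ')' 'o' (t.map fun c => PySem.Dict.getD leetDict c c) by
        simp [pairRep]]
    rw [pr_cons_ne _ _ _ _ (by decide)]
  | case4 c1 c2 t h1 h2 ih =>
    obtain ⟨rfl, rfl⟩ := h2
    have f1 : PySem.Dict.getD leetDict '[' '[' = '[' := by decide
    have f2 : PySem.Dict.getD leetDict ']' ']' = ']' := by decide
    rw [show scanLeet ('[' :: ']' :: t) = 'l' :: scanLeet t by simp [scanLeet]]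
    rw [ih]
    simp only [List.map_cons, f1, f2]
    rw [pr_cons_ne '(' ')' 'o' '[' (by decide),
        pr_cons_ne '(' ')' 'o' ']' (by decide)]
    rw [show pairRep '[' ']' 'l' ('[' :: ']' ::
          pairRep '(' ')' 'o' (t.map fun c => PySem.Dict.getD leetDict c c))
          = 'l' :: pairRep '[' ']' 'l'
              (pairRep '(' ')' 'o' (t.map fun c => PySem.Dict.getD leetDict c c)) by
        simp [pairRep]]
  | case5 c1 c2 t h1 h2 ih =>
    simp only [scanLeet, if_neg h1, if_neg h2, List.map_cons]
    have hin : ¬ (PySem.Dict.getD leetDict c1 c1 = '(' ∧ PySem.Dict.getD leetDict c2 c2 = ')') := by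
      rintro ⟨e1, e2⟩
      exact h1 ⟨lookup_bracket c1 '(' (by simp) e1, lookup_bracket c2 ')' (by simp) e2⟩
    rw [pr_cons_pair _ _ _ _ _ _ hin]
    set L := pairRep '(' ')' 'o'
      (PySem.Dict.getD leetDict c2 c2 :: (t.map fun c => PySem.Dict.getD leetDict c c)) with hL
    cases hLc : L with
    | nil => exact absurd hLc (pr_ne_nil _ _ _ _ _)
    | cons hd tl =>
      have hhd : hd = PySem.Dict.getD leetDict c2 c2 ∨ hd = 'o' := by
        have := pr_head '(' ')' 'o' (PySem.Dict.getD leetDict c2 c2)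
          (t.map fun c => PySem.Dict.getD leetDict c c)
        rw [← hL, hLc] at this
        simpa using this
      have hout : ¬ (PySem.Dict.getD leetDict c1 c1 = '[' ∧ hd = ']') := by
        rintro ⟨e1, e2⟩
        rcases hhd with h' | h'
        · rw [h'] at e2
          exact h2 ⟨lookup_bracket c1 '[' (by simp) e1, lookup_bracket c2 ']' (by simp) e2⟩
        · rw [h'] at e2; exact absurd e2 (by decide)
      rw [pr_cons_pair _ _ _ _ _ _ hout]
      rw [ih, List.map_cons, ← hL, hLc]

-- ===== VERDICT (by name: the statement is the Claim_ definition above) =====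
set_option maxHeartbeats 1000000 in
theorem decode_leetspeak_spec : Claim_equal_decode_leetspeak := by
  intro text _
  unfold Spec_decode_leetspeak decode_leetspeak decode_leetspeak_alt leetPairs
  rw [← String.toList_inj]
  simp only [List.foldl_cons, List.foldl_nil, String.toList_ofList]
  simp only [PySem.Str.toList_replace]
  rw [show ("0" : String).toList = ['0'] from rfl, show ("o" : String).toList = ['o'] from rfl,
      show ("1" : String).toList = ['1'] from rfl, show ("i" : String).toList = ['i'] from rfl,
      show ("3" : String).toList = ['3'] from rfl, show ("e" : String).toList = ['e'] from rfl,
      show ("4" : String).toList = ['4'] from rfl, show ("a" : String).toList = ['a'] from rfl,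
      show ("5" : String).toList = ['5'] from rfl, show ("s" : String).toList = ['s'] from rfl,
      show ("7" : String).toList = ['7'] from rfl, show ("t" : String).toList = ['t'] from rfl,
      show ("8" : String).toList = ['8'] from rfl, show ("b" : String).toList = ['b'] from rfl,
      show ("9" : String).toList = ['9'] from rfl, show ("g" : String).toList = ['g'] from rfl,
      show ("@" : String).toList = ['@'] from rfl, show ("$" : String).toList = ['$'] from rfl,
      show ("!" : String).toList = ['!'] from rfl, show ("|" : String).toList = ['|'] from rfl,
      show ("+" : String).toList = ['+'] from rfl,
      show ("()" : String).toList = ['(', ')'] from rfl,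
      show ("[]" : String).toList = ['[', ']'] from rfl,
      show ("l" : String).toList = ['l'] from rfl]
  simp only [replace_single, replace_pair]
  rw [maps_collapse, scan_eq]
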